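-- pv_equiv track=rewrite | github.com/mrhenrike/WordListsForHacking | wfh_modules/phone_gen.py | _expand_pattern
-- ===== SOURCE A (Python) =====
-- from itertools import product
-- from typing import Generator, Optional
--
-- def _expand_pattern(pattern: str) -> Generator[str, None, None]:
--     """
--     Expand a pattern where 'X' is any digit 0-9, literal chars are kept.
--
--     Example: "9XXXX" with N=4 generates "90000".."99999".
--
--     Args:
--         pattern: Pattern string with X as wildcard digit.
--
--     Yields:
--         All expanded strings.
--     """
--     slots: list[list[str]] = []
--     for ch in pattern:
--         if ch == "X":
--             slots.append(list("0123456789"))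
--         else:
--             slots.append([ch])
--
--     for combo in product(*slots):
--         yield "".join(combo)
-- ===== SOURCE B (Python) =====
-- def _expand_pattern(pattern):
--     """Iterative back-to-front DP: build the list of expanded suffixes, one
--     pattern position at a time from the right, instead of itertools.product."""
--     suffixes = [""]
--     for ch in reversed(pattern):
--         choices = "0123456789" if ch == "X" else ch
--         suffixes = [c + s for c in choices for s in suffixes]
--     yield from suffixes
-- ===== Notes on version B (the rewrite author's own statement) =====
-- stated objective: alternative
-- what changed: Replaces the slots list + itertools.product with a single iterative back-to-front pass that builds the list of expanded suffixes position by position, yielding the same strings in the same order.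
import Mathlib
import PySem

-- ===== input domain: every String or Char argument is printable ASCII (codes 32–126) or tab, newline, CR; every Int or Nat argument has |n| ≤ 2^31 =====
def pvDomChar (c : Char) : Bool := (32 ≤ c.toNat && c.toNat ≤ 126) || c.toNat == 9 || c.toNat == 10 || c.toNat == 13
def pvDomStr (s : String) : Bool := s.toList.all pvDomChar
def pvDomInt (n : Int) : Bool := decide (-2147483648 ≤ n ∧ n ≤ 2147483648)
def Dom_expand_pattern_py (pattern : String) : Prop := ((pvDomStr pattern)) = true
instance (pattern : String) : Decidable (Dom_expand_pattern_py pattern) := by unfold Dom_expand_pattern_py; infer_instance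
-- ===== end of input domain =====

-- B replaces the slots list + itertools.product with an iterative back-to-front suffix DP;
-- same strings in the same order (generators are compared as their yielded lists).

-- ===== PORT A =====
-- slots: for each char, ten digits if 'X' else the char itself (1-char strings ported as Char)
def pvSlots (pattern : String) : List (List Char) :=
  pattern.toList.foldl
    (fun slots ch => slots ++ [if ch = 'X' then "0123456789".toList else [ch]]) []

-- itertools.product(*slots), ported step for step: extend each partial combo by each choice
-- of the next slot (this is exactly product's lexicographic yield order)
def pvProduct (slots : List (List Char)) : List (List Char) :=
  slots.foldl (fun acc slot => acc.flatMap (fun s => slot.map (fun c => s ++ [c]))) [[]]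

def expand_pattern_py (pattern : String) : List String :=
  (pvProduct (pvSlots pattern)).map (fun combo => String.ofList combo)  -- "".join(combo)

-- ===== PORT B =====
-- loop over reversed(pattern) with the suffixes accumulator; strings built by character
-- prepending are carried as List Char and turned into String when yielded (c + s is c :: s)
def expand_pattern_py_alt (pattern : String) : List String :=
  (pattern.toList.reverse.foldl
      (fun suffixes ch =>
        (if ch = 'X' then "0123456789".toList else [ch]).flatMap
          (fun c => suffixes.map (fun s => c :: s))) [[]]).map
    (fun s => String.ofList s)

-- ===== PRECONDITION & SPEC =====
def Spec_expand_pattern_py (pattern : String) (out : List String) : Prop := out = expand_pattern_py_alt pattern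
instance (pattern : String) (out : List String) : Decidable (Spec_expand_pattern_py pattern out) := by unfold Spec_expand_pattern_py; infer_instance

-- ===== CLAIM (what is proved, stated in full; the proofs are below) =====
def Claim_equal_expand_pattern_py : Prop := ∀ (pattern : String), Dom_expand_pattern_py pattern → Spec_expand_pattern_py pattern (expand_pattern_py pattern)

-- ===== LEMMAS AND PROOFS =====

-- slots of A = per-char choices of B, mapped over the pattern
theorem pvSlots_eq (cs : List Char) (acc : List (List Char)) :
    cs.foldl (fun slots ch => slots ++ [if ch = 'X' then "0123456789".toList else [ch]]) acc
      = acc ++ cs.map (fun ch => if ch = 'X' then "0123456789".toList else [ch]) := by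
  induction cs generalizing acc with
  | nil => simp
  | cons c cs ih => rw [List.foldl_cons, ih]; simp

-- B's recursion expressed as a foldr-style product of the slot lists
def pvProdR (slots : List (List Char)) : List (List Char) :=
  match slots with
  | [] => [[]]
  | t :: ts => t.flatMap (fun c => (pvProdR ts).map (fun s => c :: s))

-- B's reverse-foldl is the foldr suffix product
theorem pvAltLoop_eq_prodR (cs : List Char) :
    cs.reverse.foldl
        (fun suffixes ch =>
          (if ch = 'X' then "0123456789".toList else [ch]).flatMap
            (fun c => suffixes.map (fun s => c :: s))) [[]]
      = pvProdR (cs.map (fun ch => if ch = 'X' then "0123456789".toList else [ch])) := by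
  rw [List.foldl_reverse]
  induction cs with
  | nil => rfl
  | cons c cs ih => simp only [List.foldr_cons, List.map_cons, pvProdR]; rw [ih]

-- the foldl product started from any acc = acc, each prefixed to the foldr product
theorem pvProduct_gen (slots : List (List Char)) (acc : List (List Char)) :
    slots.foldl (fun acc slot => acc.flatMap (fun s => slot.map (fun c => s ++ [c]))) acc
      = acc.flatMap (fun s => (pvProdR slots).map (fun t => s ++ t)) := by
  induction slots generalizing acc with
  | nil => simp [pvProdR]
  | cons t ts ih =>
      simp only [List.foldl_cons, ih, pvProdR]
      simp [List.flatMap_map, List.map_flatMap, List.map_map, Function.comp_def,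
        List.flatMap_assoc, List.append_assoc]

theorem pvProduct_eq_prodR (slots : List (List Char)) :
    pvProduct slots = pvProdR slots := by
  simp [pvProduct, pvProduct_gen]

-- ===== VERDICT (by name: the statement is the Claim_ definition above) =====
theorem expand_pattern_py_spec : Claim_equal_expand_pattern_py := by
  intro pattern _
  show _ = _
  rw [expand_pattern_py, expand_pattern_py_alt, pvSlots, pvSlots_eq,
    pvProduct_eq_prodR, pvAltLoop_eq_prodR]
  simp
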